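-- pv_equiv track=rewrite | github.com/SoSopog-dev/Hoi4-Construction-simmulator | Hoi4_construction_simulator.py | calculate_bonus
-- ===== SOURCE A (Python) =====
-- def calculate_bonus(natinal_spirits, advisors, construction_techs, trade_law, eco_law, building):
--     bonus = 0
--
--     #National Spirits
--     for spirit in natinal_spirits:
--         if building in spirit:
--             bonus += spirit[building]
--
--         if "construction" in spirit:
--             bonus += spirit["construction"]
--
--     #Advisors
--     for advisor in advisors:
--         if building in advisor:
--             bonus += advisor[building]
--
--         if "construction" in advisor:
--             bonus += advisor["construction"]
--
--     #Construction techs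
--
--     for tech in  construction_techs:
--         bonus += tech
--     #Trade Law
--
--     bonus += trade_law["construction"]
--     #Eco Law
--
--     if building in eco_law:
--         bonus += eco_law[building]
--
--     return bonus
-- ===== SOURCE B (Python) =====
-- def calculate_bonus(natinal_spirits, advisors, construction_techs, trade_law, eco_law, building):
--     # Different strategy: instead of testing each dict for the two keys of interest,
--     # first aggregate EVERY modifier key across all spirits and advisors into one
--     # key -> total tally (a merged index), then read the answer off with two lookups.
--     tally = {}
--     for group in (natinal_spirits, advisors):
--         for d in group:
--             for key, value in d.items():
--                 tally[key] = tally.get(key, 0) + value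
--     return (tally.get(building, 0)
--             + tally.get("construction", 0)
--             + sum(construction_techs)
--             + trade_law["construction"]
--             + eco_law.get(building, 0))
-- ===== Notes on version B (the rewrite author's own statement) =====
-- stated objective: alternative
-- what changed: Instead of A's running accumulator with per-dict membership tests for the two keys, B first merges all spirit/advisor modifier entries into a single key-to-total tally dictionary and then reads the result off with two lookups (plus sum of techs and the two law lookups).
import Mathlib
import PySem

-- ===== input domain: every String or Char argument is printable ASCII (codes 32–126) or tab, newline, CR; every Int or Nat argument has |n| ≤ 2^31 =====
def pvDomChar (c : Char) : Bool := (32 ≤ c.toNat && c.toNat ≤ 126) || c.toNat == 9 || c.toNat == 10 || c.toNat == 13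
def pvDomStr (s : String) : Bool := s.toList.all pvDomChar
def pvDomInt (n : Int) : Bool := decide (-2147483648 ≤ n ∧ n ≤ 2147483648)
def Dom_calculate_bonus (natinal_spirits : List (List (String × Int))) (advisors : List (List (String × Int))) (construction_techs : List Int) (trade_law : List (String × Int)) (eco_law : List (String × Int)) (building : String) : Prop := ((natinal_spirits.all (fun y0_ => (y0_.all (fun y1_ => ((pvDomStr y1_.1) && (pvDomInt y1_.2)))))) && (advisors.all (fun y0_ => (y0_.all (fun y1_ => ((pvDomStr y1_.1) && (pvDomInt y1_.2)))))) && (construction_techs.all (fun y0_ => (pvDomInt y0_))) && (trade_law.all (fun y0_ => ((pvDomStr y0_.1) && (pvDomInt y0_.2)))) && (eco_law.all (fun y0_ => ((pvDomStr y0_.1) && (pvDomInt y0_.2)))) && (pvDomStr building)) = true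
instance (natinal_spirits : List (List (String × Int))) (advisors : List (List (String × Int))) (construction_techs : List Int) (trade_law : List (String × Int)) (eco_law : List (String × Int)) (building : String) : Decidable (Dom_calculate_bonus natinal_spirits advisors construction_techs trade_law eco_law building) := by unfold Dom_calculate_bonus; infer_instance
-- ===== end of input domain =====

-- B replaces A's per-dict membership tests and running accumulator by one merged
-- key->total tally dictionary built over all spirit/advisor entries, read off with two
-- lookups (objective: alternative). Return-value equivalence only; no argument is mutated.

-- ===== PORT A =====
-- 'if building in spirit: bonus += spirit[building]; if "construction" in spirit: bonus += spirit["construction"]'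
def pvStepA (building : String) (bonus : Int) (d : List (String × Int)) : Int :=
  let b1 := if (PySem.Dict.mk d).contains building
            then bonus + (PySem.Dict.mk d).getD building 0 else bonus
  if (PySem.Dict.mk d).contains "construction"
  then b1 + (PySem.Dict.mk d).getD "construction" 0 else b1

def calculate_bonus (natinal_spirits : List (List (String × Int))) (advisors : List (List (String × Int))) (construction_techs : List Int) (trade_law : List (String × Int)) (eco_law : List (String × Int)) (building : String) : Int :=
  let bonus : Int := 0
  let bonus := natinal_spirits.foldl (pvStepA building) bonus
  let bonus := advisors.foldl (pvStepA building) bonus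
  let bonus := construction_techs.foldl (· + ·) bonus
  -- trade_law["construction"]: KeyError when absent; total form under Pre_
  let bonus := bonus + ((PySem.Dict.mk trade_law).get? "construction").getD 0
  let bonus := if (PySem.Dict.mk eco_law).contains building
               then bonus + (PySem.Dict.mk eco_law).getD building 0 else bonus
  bonus

-- ===== PORT B =====
-- 'for key, value in d.items(): tally[key] = tally.get(key, 0) + value'
def pvTallyDict (t : PySem.Dict String Int) (d : List (String × Int)) : PySem.Dict String Int :=
  d.foldl (fun t kv => t.modify kv.1 0 (· + kv.2)) t

def calculate_bonus_alt (natinal_spirits : List (List (String × Int))) (advisors : List (List (String × Int))) (construction_techs : List Int) (trade_law : List (String × Int)) (eco_law : List (String × Int)) (building : String) : Int :=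
  let tally := (natinal_spirits ++ advisors).foldl pvTallyDict PySem.Dict.empty
  tally.getD building 0
  + tally.getD "construction" 0
  + construction_techs.sum
  + ((PySem.Dict.mk trade_law).get? "construction").getD 0
  + (PySem.Dict.mk eco_law).getD building 0

-- ===== PRECONDITION & SPEC =====
-- Pre_ excludes (a) inputs where trade_law lacks the "construction" key, on which the Python A
-- raises KeyError, and (b) spirit/advisor association lists with duplicate keys, which represent
-- no Python dict (a Python dict cannot hold a key twice), so A is never called on them.
def Pre_calculate_bonus (natinal_spirits : List (List (String × Int))) (advisors : List (List (String × Int))) (construction_techs : List Int) (trade_law : List (String × Int)) (eco_law : List (String × Int)) (building : String) : Prop :=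
  (PySem.Dict.mk trade_law).contains "construction" = true ∧
  ∀ d ∈ natinal_spirits ++ advisors, (d.map Prod.fst).Nodup
instance (natinal_spirits : List (List (String × Int))) (advisors : List (List (String × Int))) (construction_techs : List Int) (trade_law : List (String × Int)) (eco_law : List (String × Int)) (building : String) : Decidable (Pre_calculate_bonus natinal_spirits advisors construction_techs trade_law eco_law building) := by unfold Pre_calculate_bonus; infer_instance

def pvWitness_calculate_bonus : (List (List (String × Int))) × (List (List (String × Int))) × List Int × (List (String × Int)) × (List (String × Int)) × String :=
  ([[("infra", 2)]], [], [3], [("construction", 1)], [("infra", 4)], "infra")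

def Spec_calculate_bonus (natinal_spirits : List (List (String × Int))) (advisors : List (List (String × Int))) (construction_techs : List Int) (trade_law : List (String × Int)) (eco_law : List (String × Int)) (building : String) (out : Int) : Prop := out = calculate_bonus_alt natinal_spirits advisors construction_techs trade_law eco_law building
instance (natinal_spirits : List (List (String × Int))) (advisors : List (List (String × Int))) (construction_techs : List Int) (trade_law : List (String × Int)) (eco_law : List (String × Int)) (building : String) (out : Int) : Decidable (Spec_calculate_bonus natinal_spirits advisors construction_techs trade_law eco_law building out) := by unfold Spec_calculate_bonus; infer_instance

-- ===== CLAIM (what is proved, stated in full; the proofs are below) =====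
def Claim_equal_calculate_bonus : Prop := ∀ (natinal_spirits : List (List (String × Int))) (advisors : List (List (String × Int))) (construction_techs : List Int) (trade_law : List (String × Int)) (eco_law : List (String × Int)) (building : String), Dom_calculate_bonus natinal_spirits advisors construction_techs trade_law eco_law building → Pre_calculate_bonus natinal_spirits advisors construction_techs trade_law eco_law building → Spec_calculate_bonus natinal_spirits advisors construction_techs trade_law eco_law building (calculate_bonus natinal_spirits advisors construction_techs trade_law eco_law building)

-- ===== LEMMAS AND PROOFS =====

-- the total a single dict's entries contribute to key k
def pvKeySum (k : String) (d : List (String × Int)) : Int :=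
  ((d.filter (fun kv => kv.1 == k)).map Prod.snd).sum

-- the inner items-loop adds, at every key k, exactly the filtered sum of d's entries at k
theorem getD_pvTallyDict (d : List (String × Int)) (t : PySem.Dict String Int) (k : String) :
    (pvTallyDict t d).getD k 0 = t.getD k 0 + pvKeySum k d := by
  induction d generalizing t with
  | nil => simp [pvTallyDict, pvKeySum]
  | cons a xs ih =>
    simp only [pvTallyDict, List.foldl_cons] at *
    rw [ih]
    by_cases h : k = a.1
    · simp [pvKeySum, h, PySem.Dict.getD_modify]
      ring
    · simp [pvKeySum, PySem.Dict.getD_modify, h, Ne.symm h]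

-- the outer loop over all dicts sums the per-dict contributions at k
theorem getD_foldl_pvTallyDict (L : List (List (String × Int))) (t : PySem.Dict String Int) (k : String) :
    (L.foldl pvTallyDict t).getD k 0 = t.getD k 0 + (L.map (pvKeySum k)).sum := by
  induction L generalizing t with
  | nil => simp
  | cons d ds ih => simp [List.foldl_cons, ih, getD_pvTallyDict]; ring

-- for a duplicate-free dict the filtered sum is exactly the (first-match) lookup
theorem pvKeySum_eq_getD (k : String) (d : List (String × Int)) (h : (d.map Prod.fst).Nodup) :
    pvKeySum k d = (PySem.Dict.mk d).getD k 0 := by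
  induction d with
  | nil => simp [pvKeySum, PySem.Dict.getD_eq_get?_getD, PySem.Dict.get?]
  | cons a xs ih =>
    obtain ⟨ak, av⟩ := a
    simp only [List.map_cons, List.nodup_cons] at h
    by_cases hk : ak = k
    · have hfil : xs.filter (fun kv => kv.1 == k) = [] := by
        apply List.filter_eq_nil_iff.mpr
        intro kv hkv hcontra
        exact h.1 (by
          have : kv.1 = k := by simpa using hcontra
          rw [hk, ← this]; exact List.mem_map_of_mem hkv)
      simp [pvKeySum, hk, hfil, PySem.Dict.getD_eq_get?_getD, PySem.Dict.get?_mk_cons]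
    · have h2 := ih h.2
      simp only [pvKeySum, PySem.Dict.getD_eq_get?_getD] at h2 ⊢
      rw [PySem.Dict.get?_mk_cons]
      simp [hk, h2]

-- A's per-dict step contributes lookup-at-building plus lookup-at-"construction"
theorem pvStepA_eq (building : String) (bonus : Int) (d : List (String × Int)) :
    pvStepA building bonus d
      = bonus + ((PySem.Dict.mk d).getD building 0 + (PySem.Dict.mk d).getD "construction" 0) := by
  unfold pvStepA
  split_ifs with hb hc hc
  · ring
  · rw [PySem.Dict.getD_of_not_contains _ (0 : Int) (eq_false_of_ne_true hc)]; ring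
  · rw [PySem.Dict.getD_of_not_contains _ (0 : Int) (eq_false_of_ne_true hb)]; ring
  · rw [PySem.Dict.getD_of_not_contains _ (0 : Int) (eq_false_of_ne_true hb),
        PySem.Dict.getD_of_not_contains _ (0 : Int) (eq_false_of_ne_true hc)]; ring

theorem foldl_stepA (building : String) (l : List (List (String × Int))) (init : Int) :
    l.foldl (pvStepA building) init
      = init + (l.map (fun d => (PySem.Dict.mk d).getD building 0
                              + (PySem.Dict.mk d).getD "construction" 0)).sum := by
  induction l generalizing init with
  | nil => simp
  | cons x xs ih => simp [List.foldl_cons, ih, pvStepA_eq]; ring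

theorem foldl_add_int (l : List Int) (init : Int) :
    l.foldl (· + ·) init = init + l.sum := by
  induction l generalizing init with
  | nil => simp
  | cons x xs ih => simp [List.foldl_cons, ih]; ring

-- under Nodup keys the map of per-dict filtered sums equals the map of lookups
theorem map_pvKeySum_eq (k : String) (L : List (List (String × Int)))
    (h : ∀ d ∈ L, (d.map Prod.fst).Nodup) :
    L.map (pvKeySum k) = L.map (fun d => (PySem.Dict.mk d).getD k 0) := by
  apply List.map_congr_left
  intro d hd
  exact pvKeySum_eq_getD k d (h d hd)

-- ===== VERDICT (by name: the statement is the Claim_ definition above) =====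
theorem calculate_bonus_spec : Claim_equal_calculate_bonus := by
  intro ns adv ct tl el b _ hpre
  obtain ⟨-, hnd⟩ := hpre
  unfold Spec_calculate_bonus calculate_bonus calculate_bonus_alt
  simp only [foldl_stepA, foldl_add_int, getD_foldl_pvTallyDict,
             map_pvKeySum_eq _ _ hnd, List.map_append, List.sum_append]
  have hsum : ∀ (L : List (List (String × Int))),
      (L.map (fun d => (PySem.Dict.mk d).getD b 0 + (PySem.Dict.mk d).getD "construction" 0)).sum
      = (L.map (fun d => (PySem.Dict.mk d).getD b 0)).sum
        + (L.map (fun d => (PySem.Dict.mk d).getD "construction" 0)).sum := by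
    intro L; induction L with
    | nil => simp
    | cons x xs ih => simp [ih]; ring
  rw [hsum, hsum]
  simp [PySem.Dict.getD_empty]
  split_ifs with hc
  · ring
  · rw [PySem.Dict.getD_of_not_contains _ (0 : Int) (eq_false_of_ne_true hc)]; ring
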